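-- pv_equiv track=rewrite | github.com/rsgrizz/shakespeare_forensics_project | desktop_creator/src/generate_play_data.py | get_character_type
-- ===== SOURCE A (Python) =====
-- def get_character_type(character_name, character_lines):
--     """Determine character type based on name and context"""
--     name_upper = character_name.upper()
--
--     # Royal characters
--     if any(title in name_upper for title in ["KING", "QUEEN", "PRINCE", "DUKE", "PRINCESS"]):
--         return "ROYAL"
--
--     # Military characters
--     if any(title in name_upper for title in ["CAPTAIN", "GENERAL", "SOLDIER", "LIEUTENANT", "COMMANDER"]):
--         return "MILITARY"
--
--     # Noble characters
--     if any(title in name_upper for title in ["LORD", "LADY", "COUNT", "BARON", "SIR", "DUCHESS"]):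
--         return "NOBLE"
--
--     # Religious characters
--     if any(word in name_upper for word in ["PRIEST", "FRIAR", "MONK", "NUN", "CARDINAL"]):
--         return "RELIGIOUS"
--
--     # Academic characters
--     if any(word in name_upper for word in ["SCHOLAR", "STUDENT", "TEACHER", "TUTOR"]):
--         return "ACADEMIC"
--
--     # Artistic characters
--     if any(word in name_upper for word in ["PLAYER", "MUSICIAN", "ARTIST", "FOOL", "CLOWN"]):
--         return "ARTISTIC"
--
--     # Advisors/counselors
--     if any(word in name_upper for word in ["POLONIUS", "COUNSELLOR", "ADVISOR"]):
--         return "ADVISORY"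
--
--     # Diplomatic characters
--     if "AMBASSADOR" in name_upper or "MESSENGER" in name_upper:
--         return "DIPLOMATIC"
--
--     # Default to merchant/civilian
--     return "MERCHANT"
-- ===== SOURCE B (Python) =====
-- # Different algorithm: instead of scanning the keyword lists and testing each
-- # with a substring search, scan the NAME once: every substring of length 3..10
-- # of the uppercased name is looked up in a keyword->(priority, category) hash
-- # table, keeping the best (lowest-priority) hit; default is MERCHANT.
-- _PRIO = {}
-- for _p, (_cat, _kws) in enumerate([
--     ("ROYAL", ["KING", "QUEEN", "PRINCE", "DUKE", "PRINCESS"]),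
--     ("MILITARY", ["CAPTAIN", "GENERAL", "SOLDIER", "LIEUTENANT", "COMMANDER"]),
--     ("NOBLE", ["LORD", "LADY", "COUNT", "BARON", "SIR", "DUCHESS"]),
--     ("RELIGIOUS", ["PRIEST", "FRIAR", "MONK", "NUN", "CARDINAL"]),
--     ("ACADEMIC", ["SCHOLAR", "STUDENT", "TEACHER", "TUTOR"]),
--     ("ARTISTIC", ["PLAYER", "MUSICIAN", "ARTIST", "FOOL", "CLOWN"]),
--     ("ADVISORY", ["POLONIUS", "COUNSELLOR", "ADVISOR"]),
--     ("DIPLOMATIC", ["AMBASSADOR", "MESSENGER"]),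
-- ]):
--     for _kw in _kws:
--         _PRIO[_kw] = (_p, _cat)
--
-- def get_character_type(character_name, character_lines):
--     """Determine character type based on name and context"""
--     name_upper = character_name.upper()
--     n = len(name_upper)
--     best = (8, "MERCHANT")
--     for i in range(n):
--         for length in range(3, 11):
--             hit = _PRIO.get(name_upper[i:i + length])
--             if hit is not None and hit[0] < best[0]:
--                 best = hit
--     return best[1]
-- ===== Notes on version B (the rewrite author's own statement) =====
-- stated objective: alternative
-- what changed: B inverts the traversal: instead of running a substring search over the name for each of the 35 keywords group by group, it scans the name once, looking up every substring of length 3-10 in a keyword->(priority,category) hash table and keeping the lowest-priority hit (MERCHANT if none).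
import Mathlib
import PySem

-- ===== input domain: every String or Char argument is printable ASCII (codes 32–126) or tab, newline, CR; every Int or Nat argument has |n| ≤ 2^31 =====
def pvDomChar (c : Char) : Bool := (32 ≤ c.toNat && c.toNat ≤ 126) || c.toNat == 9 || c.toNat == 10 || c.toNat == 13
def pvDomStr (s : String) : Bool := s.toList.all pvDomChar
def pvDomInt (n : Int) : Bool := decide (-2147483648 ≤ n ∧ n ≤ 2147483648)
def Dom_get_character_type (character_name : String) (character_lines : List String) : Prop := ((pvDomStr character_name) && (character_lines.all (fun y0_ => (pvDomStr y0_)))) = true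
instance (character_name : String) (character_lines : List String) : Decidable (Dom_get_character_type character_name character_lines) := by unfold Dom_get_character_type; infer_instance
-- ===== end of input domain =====

-- B inverts the traversal: instead of searching the name for each keyword, it scans the name
-- once, looking up every substring of length 3..10 in a keyword -> (priority, category) table
-- and keeping the lowest-priority hit (objective: alternative algorithm, same cost class).


-- ===== PORT A =====
def get_character_type (character_name : String) (character_lines : List String) : String :=
  let name_upper := PySem.Str.upper character_name
  if ["KING", "QUEEN", "PRINCE", "DUKE", "PRINCESS"].any (fun title => PySem.Str.isIn title name_upper) then "ROYAL"
  else if ["CAPTAIN", "GENERAL", "SOLDIER", "LIEUTENANT", "COMMANDER"].any (fun title => PySem.Str.isIn title name_upper) then "MILITARY"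
  else if ["LORD", "LADY", "COUNT", "BARON", "SIR", "DUCHESS"].any (fun title => PySem.Str.isIn title name_upper) then "NOBLE"
  else if ["PRIEST", "FRIAR", "MONK", "NUN", "CARDINAL"].any (fun word => PySem.Str.isIn word name_upper) then "RELIGIOUS"
  else if ["SCHOLAR", "STUDENT", "TEACHER", "TUTOR"].any (fun word => PySem.Str.isIn word name_upper) then "ACADEMIC"
  else if ["PLAYER", "MUSICIAN", "ARTIST", "FOOL", "CLOWN"].any (fun word => PySem.Str.isIn word name_upper) then "ARTISTIC"
  else if ["POLONIUS", "COUNSELLOR", "ADVISOR"].any (fun word => PySem.Str.isIn word name_upper) then "ADVISORY"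
  else if PySem.Str.isIn "AMBASSADOR" name_upper || PySem.Str.isIn "MESSENGER" name_upper then "DIPLOMATIC"
  else "MERCHANT"

-- ===== PORT B =====
-- the module-level table _PRIO of Source B: keyword -> (priority, category)
def pvPrioList : List (String × (Int × String)) :=
  [("KING", (0, "ROYAL")), ("QUEEN", (0, "ROYAL")), ("PRINCE", (0, "ROYAL")),
   ("DUKE", (0, "ROYAL")), ("PRINCESS", (0, "ROYAL")),
   ("CAPTAIN", (1, "MILITARY")), ("GENERAL", (1, "MILITARY")), ("SOLDIER", (1, "MILITARY")),
   ("LIEUTENANT", (1, "MILITARY")), ("COMMANDER", (1, "MILITARY")),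
   ("LORD", (2, "NOBLE")), ("LADY", (2, "NOBLE")), ("COUNT", (2, "NOBLE")),
   ("BARON", (2, "NOBLE")), ("SIR", (2, "NOBLE")), ("DUCHESS", (2, "NOBLE")),
   ("PRIEST", (3, "RELIGIOUS")), ("FRIAR", (3, "RELIGIOUS")), ("MONK", (3, "RELIGIOUS")),
   ("NUN", (3, "RELIGIOUS")), ("CARDINAL", (3, "RELIGIOUS")),
   ("SCHOLAR", (4, "ACADEMIC")), ("STUDENT", (4, "ACADEMIC")), ("TEACHER", (4, "ACADEMIC")),
   ("TUTOR", (4, "ACADEMIC")),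
   ("PLAYER", (5, "ARTISTIC")), ("MUSICIAN", (5, "ARTISTIC")), ("ARTIST", (5, "ARTISTIC")),
   ("FOOL", (5, "ARTISTIC")), ("CLOWN", (5, "ARTISTIC")),
   ("POLONIUS", (6, "ADVISORY")), ("COUNSELLOR", (6, "ADVISORY")), ("ADVISOR", (6, "ADVISORY")),
   ("AMBASSADOR", (7, "DIPLOMATIC")), ("MESSENGER", (7, "DIPLOMATIC"))]

def pvPrio : PySem.Dict String (Int × String) := PySem.Dict.mk pvPrioList

def get_character_type_alt (character_name : String) (character_lines : List String) : String :=
  let name_upper := PySem.Str.upper character_name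
  let n := PySem.Str.len name_upper
  let best := (PySem.List.pyRange 0 n 1).foldl (fun best i =>
      (PySem.List.pyRange 3 11 1).foldl (fun best len =>
        match PySem.Dict.get? pvPrio (PySem.Str.slice name_upper (some i) (some (i + len))) with
        | some hit => if hit.1 < best.1 then hit else best
        | none => best) best)
    (((8 : Int), "MERCHANT"))
  best.2

-- ===== PRECONDITION & SPEC =====
def Spec_get_character_type (character_name : String) (character_lines : List String) (out : String) : Prop := out = get_character_type_alt character_name character_lines
instance (character_name : String) (character_lines : List String) (out : String) : Decidable (Spec_get_character_type character_name character_lines out) := by unfold Spec_get_character_type; infer_instance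

-- ===== CLAIM =====
def Claim_equal_get_character_type : Prop := ∀ (character_name : String) (character_lines : List String), Dom_get_character_type character_name character_lines → Spec_get_character_type character_name character_lines (get_character_type character_name character_lines)

-- ===== LEMMAS AND PROOFS =====
-- the step kept by Source B's loop: keep the lower-priority pair
def pvStep (b p : Int × String) : Int × String := if p.1 < b.1 then p else b

-- all table hits produced by B's double loop, flattened in order
def pvCands (nu : String) : List (Int × String) :=
  (PySem.List.pyRange 0 (PySem.Str.len nu) 1).flatMap (fun i =>
    (PySem.List.pyRange 3 11 1).filterMap (fun len =>
      PySem.Dict.get? pvPrio (PySem.Str.slice nu (some i) (some (i + len)))))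

def pvGroupKws : Nat → List String
  | 0 => ["KING", "QUEEN", "PRINCE", "DUKE", "PRINCESS"]
  | 1 => ["CAPTAIN", "GENERAL", "SOLDIER", "LIEUTENANT", "COMMANDER"]
  | 2 => ["LORD", "LADY", "COUNT", "BARON", "SIR", "DUCHESS"]
  | 3 => ["PRIEST", "FRIAR", "MONK", "NUN", "CARDINAL"]
  | 4 => ["SCHOLAR", "STUDENT", "TEACHER", "TUTOR"]
  | 5 => ["PLAYER", "MUSICIAN", "ARTIST", "FOOL", "CLOWN"]
  | 6 => ["POLONIUS", "COUNSELLOR", "ADVISOR"]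
  | 7 => ["AMBASSADOR", "MESSENGER"]
  | _ => []

def pvCat : Nat → String
  | 0 => "ROYAL" | 1 => "MILITARY" | 2 => "NOBLE" | 3 => "RELIGIOUS"
  | 4 => "ACADEMIC" | 5 => "ARTISTIC" | 6 => "ADVISORY" | 7 => "DIPLOMATIC" | _ => "MERCHANT"

def pvCond (j : Nat) (nu : String) : Bool := (pvGroupKws j).any (fun kw => PySem.Str.isIn kw nu)

lemma pv_bfalse {b : Bool} (h : ¬ b = true) : b = false := by
  cases b
  · rfl
  · exact absurd rfl h

lemma pv_foldl_filterMap {α : Type} (l : List α) (h : α → Option (Int × String)) (b : Int × String) :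
    l.foldl (fun b x => match h x with
      | some hit => if hit.1 < b.1 then hit else b
      | none => b) b = (l.filterMap h).foldl pvStep b := by
  induction l generalizing b with
  | nil => rfl
  | cons x xs ih =>
      simp only [List.foldl_cons, List.filterMap_cons]
      cases hx : h x with
      | none => exact ih b
      | some p => simp only [List.foldl_cons, ih, pvStep]

lemma pv_foldl_flatten {α β : Type} (outer : List α) (inner : List β)
    (h : α → β → Option (Int × String)) (b : Int × String) :
    outer.foldl (fun b i => ((inner.filterMap (h i)).foldl pvStep b)) b
      = (outer.flatMap (fun i => inner.filterMap (h i))).foldl pvStep b := by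
  induction outer generalizing b with
  | nil => rfl
  | cons i os ih => simp only [List.foldl_cons, List.flatMap_cons, List.foldl_append, ih]

lemma pvAlt_eq_fold (character_name : String) (character_lines : List String) :
    get_character_type_alt character_name character_lines
      = ((pvCands (PySem.Str.upper character_name)).foldl pvStep ((8 : Int), "MERCHANT")).2 := by
  show ((PySem.List.pyRange 0 (PySem.Str.len (PySem.Str.upper character_name)) 1).foldl
      (fun best i => (PySem.List.pyRange 3 11 1).foldl (fun best len =>
        match PySem.Dict.get? pvPrio (PySem.Str.slice (PySem.Str.upper character_name) (some i) (some (i + len))) with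
        | some hit => if hit.1 < best.1 then hit else best
        | none => best) best) ((8 : Int), "MERCHANT")).2 = _
  unfold pvCands
  simp only [pv_foldl_filterMap]
  rw [pv_foldl_flatten]

lemma pvStep_fst_le_left (b p : Int × String) : (pvStep b p).1 ≤ b.1 := by
  unfold pvStep; split <;> omega

lemma pvStep_fst_le_right (b p : Int × String) : (pvStep b p).1 ≤ p.1 := by
  unfold pvStep; split <;> omega

lemma pv_fold_mem (cands : List (Int × String)) (b : Int × String) :
    cands.foldl pvStep b = b ∨ cands.foldl pvStep b ∈ cands := by
  induction cands generalizing b with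
  | nil => exact Or.inl rfl
  | cons p rest ih =>
      rcases ih (pvStep b p) with h | h
      · by_cases hp : p.1 < b.1
        · right; rw [List.foldl_cons, h]; simp [pvStep, hp]
        · left; rw [List.foldl_cons, h]; simp [pvStep, hp]
      · right; rw [List.foldl_cons]; exact List.mem_cons_of_mem _ h

lemma pv_fold_le_init (cands : List (Int × String)) (b : Int × String) :
    (cands.foldl pvStep b).1 ≤ b.1 := by
  induction cands generalizing b with
  | nil => exact le_refl _
  | cons p rest ih =>
      rw [List.foldl_cons]
      exact le_trans (ih (pvStep b p)) (pvStep_fst_le_left b p)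

lemma pv_fold_le_mem (cands : List (Int × String)) :
    ∀ (b p : Int × String), p ∈ cands → (cands.foldl pvStep b).1 ≤ p.1 := by
  induction cands with
  | nil => intro b p hp; cases hp
  | cons q rest ih =>
      intro b p hp
      rw [List.foldl_cons]
      rcases List.mem_cons.mp hp with rfl | h
      · exact le_trans (pv_fold_le_init rest (pvStep b p)) (pvStep_fst_le_right b p)
      · exact ih (pvStep b q) p h

lemma pv_key_len : ∀ q ∈ pvPrioList, 3 ≤ q.1.toList.length ∧ q.1.toList.length ≤ 10 := by decide

lemma pv_key_val : ∀ q ∈ pvPrioList,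
    ∃ j : Fin 8, q.2 = (((j : Nat) : Int), pvCat (j : Nat)) ∧ q.1 ∈ pvGroupKws (j : Nat) := by decide

lemma pv_group_get : ∀ j : Fin 8, ∀ kw ∈ pvGroupKws (j : Nat),
    PySem.Dict.get? pvPrio kw = some (((j : Nat) : Int), pvCat (j : Nat)) := by decide

lemma pv_mem_items {kw : String} {p : Int × String}
    (h : PySem.Dict.get? pvPrio kw = some p) : (kw, p) ∈ pvPrioList :=
  PySem.Dict.mem_items_of_get?_eq_some pvPrio h

lemma pv_mem_cands_iff (nu : String) (p : Int × String) :
    p ∈ pvCands nu ↔ ∃ kw : String,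
      PySem.Dict.get? pvPrio kw = some p ∧ kw.toList <:+: nu.toList := by
  constructor
  · intro hp
    simp only [pvCands, List.mem_flatMap, List.mem_filterMap] at hp
    obtain ⟨i, hi, len, hlen, hget⟩ := hp
    obtain ⟨hi0, _⟩ := PySem.List.mem_pyRange_one.mp hi
    obtain ⟨hl3, _⟩ := PySem.List.mem_pyRange_one.mp hlen
    refine ⟨_, hget, ?_⟩
    rw [PySem.Str.toList_slice, PySem.Chars.slice_eq_listSlice,
        PySem.List.slice_toNat _ hi0 (by omega)]
    exact (List.take_prefix _ _).isInfix.trans (List.drop_suffix _ _).isInfix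
  · rintro ⟨kw, hget, hinf⟩
    have hq := pv_key_len _ (pv_mem_items hget)
    have hisin : PySem.Chars.isIn kw.toList nu.toList = true :=
      (PySem.Chars.isIn_iff_infix _ _).mpr hinf
    obtain ⟨j, hpre⟩ := (PySem.Chars.exists_prefix_drop_iff_isIn _ _).mpr hisin
    have hkwnil : kw.toList ≠ [] := by
      intro h; rw [h] at hq; simp at hq
    have hjlt : j < nu.toList.length := by
      by_contra hc
      rw [List.drop_eq_nil_of_le (by omega)] at hpre
      exact hkwnil (List.prefix_nil.mp hpre)
    simp only [pvCands, List.mem_flatMap, List.mem_filterMap]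
    refine ⟨(j : Int), PySem.List.mem_pyRange_one.mpr ⟨Int.natCast_nonneg j, ?_⟩,
      ((kw.toList.length : Nat) : Int), PySem.List.mem_pyRange_one.mpr ⟨by exact_mod_cast hq.1, by exact_mod_cast Nat.lt_succ_of_le hq.2⟩, ?_⟩
    · show (j : Int) < ((nu.toList.length : Nat) : Int)
      exact_mod_cast hjlt
    · have hslice : PySem.Str.slice nu (some (j : Int)) (some ((j : Int) + (kw.toList.length : Int))) = kw := by
        apply String.toList_inj.mp
        rw [PySem.Str.toList_slice, PySem.Chars.slice_eq_listSlice,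
            PySem.List.slice_natCast_add]
        exact (List.prefix_iff_eq_take.mp hpre).symm
      rw [hslice]
      exact hget

lemma pv_cond_iff (j : Fin 8) (nu : String) :
    pvCond (j : Nat) nu = true ↔ ((((j : Nat) : Int), pvCat (j : Nat))) ∈ pvCands nu := by
  constructor
  · intro h
    obtain ⟨kw, hkw, hin⟩ := List.any_eq_true.mp h
    exact (pv_mem_cands_iff nu _).mpr
      ⟨kw, pv_group_get j kw hkw, (PySem.Str.isIn_iff_infix kw nu).mp hin⟩
  · intro h
    obtain ⟨kw, hget, hinf⟩ := (pv_mem_cands_iff nu _).mp h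
    obtain ⟨j', hval, hmem⟩ := pv_key_val _ (pv_mem_items hget)
    have hval' : ((((j : Nat) : Int), pvCat (j : Nat)) : Int × String)
        = (((j' : Nat) : Int), pvCat (j' : Nat)) := hval
    have hjj : (j' : Nat) = (j : Nat) := by
      have := congrArg Prod.fst hval'
      simp only [] at this
      omega
    rw [← hjj]
    exact List.any_eq_true.mpr ⟨kw, hmem, (PySem.Str.isIn_iff_infix kw nu).mpr hinf⟩

lemma pv_pick (nu : String) (j : Nat) (hj8 : j < 8) (hj : pvCond j nu = true)
    (hprev : ∀ k : Nat, k < j → pvCond k nu = false) :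
    (pvCands nu).foldl pvStep ((8 : Int), "MERCHANT") = ((j : Int), pvCat j) := by
  have hmem : (((j : Int), pvCat j) : Int × String) ∈ pvCands nu :=
    (pv_cond_iff ⟨j, hj8⟩ nu).mp hj
  have hle : ((pvCands nu).foldl pvStep ((8 : Int), "MERCHANT")).1 ≤ (j : Int) :=
    pv_fold_le_mem (pvCands nu) ((8 : Int), "MERCHANT") _ hmem
  rcases pv_fold_mem (pvCands nu) ((8 : Int), "MERCHANT") with h8 | hin
  · exfalso
    rw [h8] at hle
    have : (8 : Int) ≤ (j : Int) := hle
    omega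
  · obtain ⟨kw, hget, hinf⟩ := (pv_mem_cands_iff nu _).mp hin
    obtain ⟨j₂, hval, hmem₂⟩ := pv_key_val _ (pv_mem_items hget)
    have hval' : (pvCands nu).foldl pvStep ((8 : Int), "MERCHANT")
        = ((((j₂ : Nat) : Nat) : Int), pvCat (j₂ : Nat)) := hval
    have hmem₂' : kw ∈ pvGroupKws (j₂ : Nat) := hmem₂
    have hcond₂ : pvCond (j₂ : Nat) nu = true :=
      List.any_eq_true.mpr ⟨kw, hmem₂', (PySem.Str.isIn_iff_infix kw nu).mpr hinf⟩
    have hge : j ≤ (j₂ : Nat) := by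
      by_contra hlt
      rw [hprev (j₂ : Nat) (by omega)] at hcond₂
      cases hcond₂
    have hfle : (((j₂ : Nat) : Nat) : Int) ≤ (j : Int) := by
      rw [hval'] at hle
      exact hle
    have hjj : (j₂ : Nat) = j := by omega
    rw [hval', hjj]

lemma pv_none (nu : String) (h : ∀ jf : Fin 8, pvCond (jf : Nat) nu = false) :
    (pvCands nu).foldl pvStep ((8 : Int), "MERCHANT") = ((8 : Int), "MERCHANT") := by
  rcases pv_fold_mem (pvCands nu) ((8 : Int), "MERCHANT") with h8 | hin
  · exact h8
  · obtain ⟨kw, hget, hinf⟩ := (pv_mem_cands_iff nu _).mp hin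
    obtain ⟨j₂, hval, hmem₂⟩ := pv_key_val _ (pv_mem_items hget)
    have hmem₂' : kw ∈ pvGroupKws (j₂ : Nat) := hmem₂
    have : pvCond (j₂ : Nat) nu = true :=
      List.any_eq_true.mpr ⟨kw, hmem₂', (PySem.Str.isIn_iff_infix kw nu).mpr hinf⟩
    rw [h j₂] at this
    cases this

-- ===== VERDICT =====
theorem get_character_type_spec : Claim_equal_get_character_type := by
  intro character_name character_lines _
  unfold Spec_get_character_type
  rw [pvAlt_eq_fold]
  have hA : get_character_type character_name character_lines =
      (if ["KING", "QUEEN", "PRINCE", "DUKE", "PRINCESS"].any (fun title => PySem.Str.isIn title (PySem.Str.upper character_name)) then "ROYAL"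
       else if ["CAPTAIN", "GENERAL", "SOLDIER", "LIEUTENANT", "COMMANDER"].any (fun title => PySem.Str.isIn title (PySem.Str.upper character_name)) then "MILITARY"
       else if ["LORD", "LADY", "COUNT", "BARON", "SIR", "DUCHESS"].any (fun title => PySem.Str.isIn title (PySem.Str.upper character_name)) then "NOBLE"
       else if ["PRIEST", "FRIAR", "MONK", "NUN", "CARDINAL"].any (fun word => PySem.Str.isIn word (PySem.Str.upper character_name)) then "RELIGIOUS"
       else if ["SCHOLAR", "STUDENT", "TEACHER", "TUTOR"].any (fun word => PySem.Str.isIn word (PySem.Str.upper character_name)) then "ACADEMIC"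
       else if ["PLAYER", "MUSICIAN", "ARTIST", "FOOL", "CLOWN"].any (fun word => PySem.Str.isIn word (PySem.Str.upper character_name)) then "ARTISTIC"
       else if ["POLONIUS", "COUNSELLOR", "ADVISOR"].any (fun word => PySem.Str.isIn word (PySem.Str.upper character_name)) then "ADVISORY"
       else if PySem.Str.isIn "AMBASSADOR" (PySem.Str.upper character_name) || PySem.Str.isIn "MESSENGER" (PySem.Str.upper character_name) then "DIPLOMATIC"
       else "MERCHANT") := rfl
  rw [hA]
  set nu := PySem.Str.upper character_name with hnu
  by_cases h0 : (["KING", "QUEEN", "PRINCE", "DUKE", "PRINCESS"].any (fun title => PySem.Str.isIn title nu)) = true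
  · have hp0 : ∀ k : Nat, k < 0 → pvCond k nu = false := by
        intro k hk; exact absurd hk (by omega)
    rw [if_pos h0, pv_pick nu 0 (by omega) h0 hp0]
    rfl
  · rw [if_neg h0]
    by_cases h1 : (["CAPTAIN", "GENERAL", "SOLDIER", "LIEUTENANT", "COMMANDER"].any (fun title => PySem.Str.isIn title nu)) = true
    · have hp1 : ∀ k : Nat, k < 1 → pvCond k nu = false := by
          intro k hk; interval_cases k
          exacts [pv_bfalse h0]
      rw [if_pos h1, pv_pick nu 1 (by omega) h1 hp1]
      rfl
    · rw [if_neg h1]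
      by_cases h2 : (["LORD", "LADY", "COUNT", "BARON", "SIR", "DUCHESS"].any (fun title => PySem.Str.isIn title nu)) = true
      · have hp2 : ∀ k : Nat, k < 2 → pvCond k nu = false := by
            intro k hk; interval_cases k
            exacts [pv_bfalse h0, pv_bfalse h1]
        rw [if_pos h2, pv_pick nu 2 (by omega) h2 hp2]
        rfl
      · rw [if_neg h2]
        by_cases h3 : (["PRIEST", "FRIAR", "MONK", "NUN", "CARDINAL"].any (fun word => PySem.Str.isIn word nu)) = true
        · have hp3 : ∀ k : Nat, k < 3 → pvCond k nu = false := by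
              intro k hk; interval_cases k
              exacts [pv_bfalse h0, pv_bfalse h1, pv_bfalse h2]
          rw [if_pos h3, pv_pick nu 3 (by omega) h3 hp3]
          rfl
        · rw [if_neg h3]
          by_cases h4 : (["SCHOLAR", "STUDENT", "TEACHER", "TUTOR"].any (fun word => PySem.Str.isIn word nu)) = true
          · have hp4 : ∀ k : Nat, k < 4 → pvCond k nu = false := by
                intro k hk; interval_cases k
                exacts [pv_bfalse h0, pv_bfalse h1, pv_bfalse h2, pv_bfalse h3]
            rw [if_pos h4, pv_pick nu 4 (by omega) h4 hp4]
            rfl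
          · rw [if_neg h4]
            by_cases h5 : (["PLAYER", "MUSICIAN", "ARTIST", "FOOL", "CLOWN"].any (fun word => PySem.Str.isIn word nu)) = true
            · have hp5 : ∀ k : Nat, k < 5 → pvCond k nu = false := by
                  intro k hk; interval_cases k
                  exacts [pv_bfalse h0, pv_bfalse h1, pv_bfalse h2, pv_bfalse h3, pv_bfalse h4]
              rw [if_pos h5, pv_pick nu 5 (by omega) h5 hp5]
              rfl
            · rw [if_neg h5]
              by_cases h6 : (["POLONIUS", "COUNSELLOR", "ADVISOR"].any (fun word => PySem.Str.isIn word nu)) = true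
              · have hp6 : ∀ k : Nat, k < 6 → pvCond k nu = false := by
                    intro k hk; interval_cases k
                    exacts [pv_bfalse h0, pv_bfalse h1, pv_bfalse h2, pv_bfalse h3, pv_bfalse h4, pv_bfalse h5]
                rw [if_pos h6, pv_pick nu 6 (by omega) h6 hp6]
                rfl
              · rw [if_neg h6]
                by_cases h7 : (PySem.Str.isIn "AMBASSADOR" nu || PySem.Str.isIn "MESSENGER" nu) = true
                · have hp7 : ∀ k : Nat, k < 7 → pvCond k nu = false := by
                      intro k hk; interval_cases k
                      exacts [pv_bfalse h0, pv_bfalse h1, pv_bfalse h2, pv_bfalse h3, pv_bfalse h4, pv_bfalse h5, pv_bfalse h6]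
                  have h7P : pvCond 7 nu = true := by
                    simp only [pvCond, pvGroupKws, List.any_cons, List.any_nil, Bool.or_false]
                    exact h7
                  rw [if_pos h7, pv_pick nu 7 (by omega) h7P hp7]
                  rfl
                · rw [if_neg h7]
                  have h7F : pvCond 7 nu = false := by
                    simp only [pvCond, pvGroupKws, List.any_cons, List.any_nil, Bool.or_false]
                    exact pv_bfalse h7
                  have hnone : ∀ jf : Fin 8, pvCond (jf : Nat) nu = false := by
                    intro jf; fin_cases jf
                    exacts [pv_bfalse h0, pv_bfalse h1, pv_bfalse h2, pv_bfalse h3,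
                      pv_bfalse h4, pv_bfalse h5, pv_bfalse h6, h7F]
                  rw [pv_none nu hnone]
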